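-- pv_equiv track=rewrite | github.com/voaitmann1/python1 | AP/MyLinAlgLib.py | MatrixScalarSubtractDiagonal
-- ===== SOURCE A (Python) =====
-- def MatrixScalarSubtractDiagonal(M, x):
--     Y=[]
--     QL=len(M)
--     QC=QL
--     for i in range(QL):
--         R=[]
--         for j in range(QC):
--             if i==j:
--                 R.append(M[i][j]-x)
--             else:
--                 R.append(M[i][j])
--         Y.append(R)
--     return Y
-- ===== SOURCE B (Python) =====
-- def MatrixScalarSubtractDiagonal(M, x):
--     n = len(M)
--     return [row[:i] + [row[i] - x] + row[i + 1:n] for i, row in enumerate(M)]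
-- ===== Notes on version B (the rewrite author's own statement) =====
-- stated objective: alternative
-- what changed: B has no inner index loop and no i==j branch: it builds each output row by slice concatenation row[:i] + [row[i]-x] + row[i+1:n] while iterating rows with enumerate, where A runs a doubly indexed nested loop appending element by element with a branch on i==j; the bulk copying via slices is a constant-factor speedup over per-element appends.
import Mathlib
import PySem

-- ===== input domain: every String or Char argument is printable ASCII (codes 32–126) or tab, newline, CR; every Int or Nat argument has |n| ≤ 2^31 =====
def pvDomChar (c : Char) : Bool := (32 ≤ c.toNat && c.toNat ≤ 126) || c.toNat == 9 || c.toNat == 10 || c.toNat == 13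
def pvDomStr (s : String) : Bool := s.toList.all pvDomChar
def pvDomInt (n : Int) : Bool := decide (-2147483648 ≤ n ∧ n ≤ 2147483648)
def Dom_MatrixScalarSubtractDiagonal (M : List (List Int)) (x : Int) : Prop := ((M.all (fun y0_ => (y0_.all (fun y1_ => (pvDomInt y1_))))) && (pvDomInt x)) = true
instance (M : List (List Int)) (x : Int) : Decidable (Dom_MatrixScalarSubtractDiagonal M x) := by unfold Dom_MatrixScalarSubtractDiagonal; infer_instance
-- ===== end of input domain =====

-- B builds each output row by list slicing around the one diagonal element (row[:i] + [row[i]-x] + row[i+1:n]) over enumerate, instead of A's doubly indexed loop with an i==j branch (simpler decomposition, same O(n^2) cost).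


-- ===== PORT A =====
def MatrixScalarSubtractDiagonal (M : List (List Int)) (x : Int) : List (List Int) :=
  (PySem.List.pyRange 0 (M.length : Int) 1).foldl (fun Y i =>
    Y ++ [(PySem.List.pyRange 0 (M.length : Int) 1).foldl (fun R j =>
      if i == j then
        R ++ [PySem.List.pyGetD (PySem.List.pyGetD M i []) j 0 - x]
      else
        R ++ [PySem.List.pyGetD (PySem.List.pyGetD M i []) j 0]) []]) []

-- ===== PORT B =====
def MatrixScalarSubtractDiagonal_alt (M : List (List Int)) (x : Int) : List (List Int) :=
  let n := M.length
  (PySem.List.enumerate M).map (fun p =>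
    PySem.List.slice p.2 none (some p.1) ++
    [PySem.List.pyGetD p.2 p.1 0 - x] ++
    PySem.List.slice p.2 (some (p.1 + 1)) (some (n : Int)))

-- ===== PRECONDITION & SPEC =====
-- Pre_ excludes exactly the inputs on which A raises IndexError: some row of M shorter than len(M).
def Pre_MatrixScalarSubtractDiagonal (M : List (List Int)) (x : Int) : Prop :=
  ∀ r ∈ M, M.length ≤ r.length
instance (M : List (List Int)) (x : Int) : Decidable (Pre_MatrixScalarSubtractDiagonal M x) := by unfold Pre_MatrixScalarSubtractDiagonal; infer_instance
def pvWitness_MatrixScalarSubtractDiagonal : List (List Int) × Int := ([[1, 2], [3, 4]], 5)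

def Spec_MatrixScalarSubtractDiagonal (M : List (List Int)) (x : Int) (out : List (List Int)) : Prop := out = MatrixScalarSubtractDiagonal_alt M x
instance (M : List (List Int)) (x : Int) (out : List (List Int)) : Decidable (Spec_MatrixScalarSubtractDiagonal M x out) := by unfold Spec_MatrixScalarSubtractDiagonal; infer_instance

-- ===== CLAIM (what is proved, stated in full; the proofs are below) =====
def Claim_equal_MatrixScalarSubtractDiagonal : Prop := ∀ (M : List (List Int)) (x : Int), Dom_MatrixScalarSubtractDiagonal M x → Pre_MatrixScalarSubtractDiagonal M x → Spec_MatrixScalarSubtractDiagonal M x (MatrixScalarSubtractDiagonal M x)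

-- ===== LEMMAS AND PROOFS =====

-- A's inner loop over range(n) as a map with the i==j branch resolved elementwise
theorem inner_eq (M : List (List Int)) (x : Int) (n : Nat) (i : Nat) :
    ((List.range n).map (fun k : Nat => (k : Int))).foldl (fun R j =>
      if (i : Int) == j then
        R ++ [PySem.List.pyGetD (PySem.List.pyGetD M (i : Int) []) j 0 - x]
      else
        R ++ [PySem.List.pyGetD (PySem.List.pyGetD M (i : Int) []) j 0]) [] =
    (List.range n).map (fun j =>
      if i = j then PySem.List.pyGetD (PySem.List.pyGetD M (i : Int) []) (j : Int) 0 - x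
      else PySem.List.pyGetD (PySem.List.pyGetD M (i : Int) []) (j : Int) 0) := by
  rw [List.foldl_map]
  have hbody : ∀ (R : List Int) (j : Nat),
      (if (i : Int) == ((j : Nat) : Int) then
        R ++ [PySem.List.pyGetD (PySem.List.pyGetD M (i : Int) []) (j : Int) 0 - x]
      else
        R ++ [PySem.List.pyGetD (PySem.List.pyGetD M (i : Int) []) (j : Int) 0]) =
      R ++ [if i = j then PySem.List.pyGetD (PySem.List.pyGetD M (i : Int) []) (j : Int) 0 - x
            else PySem.List.pyGetD (PySem.List.pyGetD M (i : Int) []) (j : Int) 0] := by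
    intro R j
    by_cases h : i = j <;> simp [h]
  simp only [hbody]
  simpa using PySem.List.foldl_append_singleton_eq_map
    (fun j : Nat => if i = j then PySem.List.pyGetD (PySem.List.pyGetD M (i : Int) []) (j : Int) 0 - x
      else PySem.List.pyGetD (PySem.List.pyGetD M (i : Int) []) (j : Int) 0) (List.range n) []

-- B's slice-built row equals A's branch-built row when the row is long enough
theorem row_slices_eq (r : List Int) (x : Int) (n i : Nat) (hi : i < n) (hr : n ≤ r.length) :
    r.take i ++ [PySem.List.pyGetD r (i : Int) 0 - x] ++ (r.drop (i + 1)).take (n - (i + 1)) =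
      (List.range n).map (fun j =>
        if i = j then PySem.List.pyGetD r (j : Int) 0 - x else PySem.List.pyGetD r (j : Int) 0) := by
  have hir : i ≤ r.length := by omega
  apply List.ext_getElem?
  intro k
  by_cases hk : k < n
  · rw [List.getElem?_map, List.getElem?_range hk]
    have hkr : k < r.length := lt_of_lt_of_le hk hr
    have hmin : min i r.length = i := by omega
    simp only [List.getElem?_append, List.length_append, List.length_take, List.length_cons,
      List.length_nil, List.getElem?_take, List.getElem?_drop, List.getElem?_cons,
      PySem.List.pyGetD_natCast, hmin, Option.map_some]
    split_ifs <;> simp_all [List.getD] <;> omega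
  · have hL : (r.take i ++ [PySem.List.pyGetD r (i : Int) 0 - x] ++ (r.drop (i + 1)).take (n - (i + 1))).length = n := by
      simp; omega
    rw [List.getElem?_eq_none (by rw [hL]; omega),
        List.getElem?_eq_none (by simpa using Nat.le_of_not_lt hk)]

theorem MatrixScalarSubtractDiagonal_eq (M : List (List Int)) (x : Int)
    (hpre : ∀ r ∈ M, M.length ≤ r.length) :
    MatrixScalarSubtractDiagonal M x = MatrixScalarSubtractDiagonal_alt M x := by
  simp only [MatrixScalarSubtractDiagonal, MatrixScalarSubtractDiagonal_alt]
  rw [PySem.List.pyRange_zero_natCast, List.foldl_map,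
      PySem.List.foldl_append_singleton_eq_map,
      PySem.List.enumerate_eq_map_pyRange M ([] : List Int), PySem.List.len,
      PySem.List.pyRange_zero_natCast, List.map_map, List.map_map]
  apply List.map_congr_left
  intro i hi
  have hin : i < M.length := by simpa using hi
  have hr : M.length ≤ (PySem.List.pyGetD M (i : Int) []).length := by
    apply hpre
    rw [PySem.List.pyGetD_natCast, List.getD, List.getElem?_eq_getElem hin]
    exact List.getElem_mem hin
  simp only [Function.comp]
  rw [inner_eq M x M.length i, ← row_slices_eq (PySem.List.pyGetD M (i : Int) []) x M.length i hin hr]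
  have h1 : PySem.List.slice (PySem.List.pyGetD M (i : Int) []) none (some (i : Int)) =
      (PySem.List.pyGetD M (i : Int) []).take i := PySem.List.slice_to_natCast _ _
  have h2 : PySem.List.slice (PySem.List.pyGetD M (i : Int) []) (some ((i : Int) + 1)) (some (M.length : Int)) =
      ((PySem.List.pyGetD M (i : Int) []).drop (i + 1)).take (M.length - (i + 1)) := by
    have : ((i : Int) + 1) = ((i + 1 : Nat) : Int) := by push_cast; ring
    rw [this, PySem.List.slice_natCast]
  rw [h1, h2]

-- ===== VERDICT (by name: the statement is the Claim_ definition above) =====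
theorem MatrixScalarSubtractDiagonal_spec : Claim_equal_MatrixScalarSubtractDiagonal := by
  intro M x _ hpre
  unfold Spec_MatrixScalarSubtractDiagonal
  exact MatrixScalarSubtractDiagonal_eq M x hpre
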